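-- pv_equiv track=rewrite | github.com/szerintedmi/kinetic-mirror-matrix-esp32 | tools/serial_cli/__init__.py | parse_thermal_get_response
-- ===== SOURCE A (Python) =====
-- from typing import List, Dict, Optional, Tuple
--
-- def parse_thermal_get_response(text: str) -> Optional[Tuple[bool, Optional[int]]]:
--     """Parse GET THERMAL_LIMITING response.
--     Returns (enabled, max_budget_s) or None if not parseable.
--     """
--     if not text:
--         return None
--     enabled = None
--     max_budget = None
--     try:
--         # Expect line like: CTRL:OK THERMAL_LIMITING=ON max_budget_s=90
--         for tok in text.strip().split():
--             if tok.startswith("THERMAL_LIMITING="):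
--                 val = tok.split("=", 1)[1].strip().upper()
--                 enabled = (val == "ON")
--             elif tok.startswith("max_budget_s="):
--                 try:
--                     max_budget = int(tok.split("=", 1)[1])
--                 except Exception:
--                     max_budget = None
--         if enabled is None:
--             return None
--         return (enabled, max_budget)
--     except Exception:
--         return None
-- ===== SOURCE B (Python) =====
-- def parse_thermal_get_response(text):
--     """Parse GET THERMAL_LIMITING response.
--     Returns (enabled, max_budget_s) or None if not parseable.
--     """
--     if not text:
--         return None
--     toks = text.strip().split()
--     tl = next((t for t in reversed(toks) if t.startswith("THERMAL_LIMITING=")), None)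
--     if tl is None:
--         return None
--     enabled = tl.split("=", 1)[1].strip().upper() == "ON"
--     mb = next((t for t in reversed(toks) if t.startswith("max_budget_s=")), None)
--     max_budget = None
--     if mb is not None:
--         try:
--             max_budget = int(mb.split("=", 1)[1])
--         except ValueError:
--             max_budget = None
--     return (enabled, max_budget)
-- ===== Notes on version B (the rewrite author's own statement) =====
-- stated objective: idiomatic
-- what changed: replaces A's single forward fold that mutates two accumulators with two idiomatic backward first-match searches (next(... reversed(toks) ...)), exploiting that last-occurrence-wins equals first match from the back
import Mathlib
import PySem

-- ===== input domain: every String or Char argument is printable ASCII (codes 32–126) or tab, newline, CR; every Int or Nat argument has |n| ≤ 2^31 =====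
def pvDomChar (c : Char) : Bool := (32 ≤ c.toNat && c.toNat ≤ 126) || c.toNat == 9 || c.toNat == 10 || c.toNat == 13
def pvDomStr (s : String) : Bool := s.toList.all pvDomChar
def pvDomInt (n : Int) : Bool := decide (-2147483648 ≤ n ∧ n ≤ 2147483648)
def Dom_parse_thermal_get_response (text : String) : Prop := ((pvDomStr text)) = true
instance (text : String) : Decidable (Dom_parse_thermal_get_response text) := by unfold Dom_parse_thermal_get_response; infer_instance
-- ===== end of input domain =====

-- B replaces A's single forward fold over two mutable accumulators by two backward
-- first-match searches (last occurrence wins = first match from the back); objective: idiomatic.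

-- ===== PORT A =====
-- value of tok.split("=", 1)[1]; in A it is only evaluated when tok starts with "…=",
-- so the split has ≥ 2 parts and the [1] never raises (the .getD defaults never fire)
def pvEqRest (tok : String) : String :=
  ((PySem.Str.splitMax? tok "=" 1).getD []).getD 1 ""

def pvA_step (st : Option Bool × Option Int) (tok : String) : Option Bool × Option Int :=
  if PySem.Str.startswith tok "THERMAL_LIMITING=" then
    (some (PySem.Str.upper (PySem.Str.strip (pvEqRest tok)) == "ON"), st.2)
  else if PySem.Str.startswith tok "max_budget_s=" then
    (st.1, PySem.Int.ofStr? (pvEqRest tok))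
  else st

def parse_thermal_get_response (text : String) : Option (Bool × Option Int) :=
  if text = "" then none
  else
    let st := (PySem.Str.split₀ (PySem.Str.strip text)).foldl pvA_step (none, none)
    match st.1 with
    | none => none
    | some e => some (e, st.2)

-- ===== PORT B =====
def parse_thermal_get_response_alt (text : String) : Option (Bool × Option Int) :=
  if text = "" then none
  else
    let toks := PySem.Str.split₀ (PySem.Str.strip text)
    match toks.reverse.find? (fun t => PySem.Str.startswith t "THERMAL_LIMITING=") with
    | none => none
    | some tl =>
      let enabled := PySem.Str.upper (PySem.Str.strip (pvEqRest tl)) == "ON"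
      let max_budget : Option Int :=
        match toks.reverse.find? (fun t => PySem.Str.startswith t "max_budget_s=") with
        | none => none
        | some mb => PySem.Int.ofStr? (pvEqRest mb)
      some (enabled, max_budget)

-- ===== PRECONDITION & SPEC =====
def Spec_parse_thermal_get_response (text : String) (out : Option (Bool × Option Int)) : Prop := out = parse_thermal_get_response_alt text
instance (text : String) (out : Option (Bool × Option Int)) : Decidable (Spec_parse_thermal_get_response text out) := by unfold Spec_parse_thermal_get_response; infer_instance

-- ===== CLAIM (what is proved, stated in full; the proofs are below) =====
def Claim_equal_parse_thermal_get_response : Prop := ∀ (text : String), Dom_parse_thermal_get_response text → Spec_parse_thermal_get_response text (parse_thermal_get_response text)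

-- ===== LEMMAS AND PROOFS =====

-- a token cannot start with both key prefixes
lemma pv_not_both (t : String)
    (h : PySem.Str.startswith t "THERMAL_LIMITING=" = true) :
    PySem.Str.startswith t "max_budget_s=" = false := by
  by_contra hB
  rw [Bool.not_eq_false] at hB
  rw [PySem.Str.startswith_eq, PySem.Chars.startswith_iff] at h hB
  rcases List.prefix_or_prefix_of_prefix h hB with hp | hp
  · exact absurd hp (by decide)
  · exact absurd hp (by decide)

-- A's fold characterised by the last matching token for each key (= first from the back)
lemma pv_fold_char (toks : List String) :
    toks.foldl pvA_step (none, none) =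
      ((toks.reverse.find? (fun t => PySem.Str.startswith t "THERMAL_LIMITING=")).map
          (fun t => PySem.Str.upper (PySem.Str.strip (pvEqRest t)) == "ON"),
       (toks.reverse.find? (fun t => PySem.Str.startswith t "max_budget_s=")).bind
          (fun t => PySem.Int.ofStr? (pvEqRest t))) := by
  induction toks using List.reverseRecOn with
  | nil => rfl
  | append_singleton l t ih =>
    rw [List.foldl_append, List.foldl_cons, List.foldl_nil, ih,
        List.reverse_append, List.reverse_singleton, List.singleton_append,
        List.find?_cons, List.find?_cons]
    unfold pvA_step
    by_cases hT : PySem.Str.startswith t "THERMAL_LIMITING=" = true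
    · have hM := pv_not_both t hT
      simp at hT hM
      simp [hT, hM]
    · by_cases hM : PySem.Str.startswith t "max_budget_s=" = true
      · simp at hT hM
        simp [hT, hM]
      · simp at hT hM
        simp [hT, hM]

-- ===== VERDICT (by name: the statement is the Claim_ definition above) =====
theorem parse_thermal_get_response_spec : Claim_equal_parse_thermal_get_response := by
  intro text _
  unfold Spec_parse_thermal_get_response parse_thermal_get_response parse_thermal_get_response_alt
  by_cases h : text = ""
  · subst h; rfl
  · rw [if_neg h, if_neg h]
    simp only [pv_fold_char]
    cases (PySem.Str.split₀ (PySem.Str.strip text)).reverse.find?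
        (fun t => PySem.Str.startswith t "THERMAL_LIMITING=") with
    | none => rfl
    | some tl =>
      cases (PySem.Str.split₀ (PySem.Str.strip text)).reverse.find?
          (fun t => PySem.Str.startswith t "max_budget_s=") with
      | none => rfl
      | some mb => rfl
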